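-- pv_equiv track=rewrite | github.com/kaluginpeter/Algorithms_and_structures_tasks | CodeWars/6kyu/Simple_Fun_180_Repeat_Adjacent.py | repeat_adjacent
-- ===== SOURCE A (Python) =====
-- def repeat_adjacent(st):
--     count: int = 0
--     lst: list = list()
--     el, count_el = None, 0
--     for i in st:
--         if el is None:
--             el, count_el = i, 1
--         elif el == i:
--             count_el += 1
--         else:
--             if count_el == 1:
--                 if len(lst) > 1:
--                     count += 1
--                 lst.clear()
--             else:
--                 lst.append(count_el)
--             el, count_el = i, 1
--     if count_el > 1:
--         lst.append(count_el)
--     if len(lst) > 1: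
--         count += 1
--     return count
-- ===== SOURCE B (Python) =====
-- def repeat_adjacent(st):
--     # pass 1: run-length encode the string
--     runs = []
--     i, n = 0, len(st)
--     while i < n:
--         j = i
--         while j < n and st[j] == st[i]:
--             j += 1
--         runs.append(j - i)
--         i = j
--     # pass 2: count maximal blocks of >=2 consecutive runs of length >=2
--     total = 0
--     block = 0
--     for L in runs:
--         if L >= 2:
--             block += 1
--         else:
--             if block >= 2:
--                 total += 1
--             block = 0
--     if block >= 2:
--         total += 1
--     return total
-- ===== Notes on version B (the rewrite author's own statement) =====
-- stated objective: simpler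
-- what changed: Replaces A's single interleaved scan (None sentinel, accumulator list of run lengths, clear/append bookkeeping) by two plain passes: run-length encoding first, then a scan over the run lengths keeping only an integer block counter.
import Mathlib
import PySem

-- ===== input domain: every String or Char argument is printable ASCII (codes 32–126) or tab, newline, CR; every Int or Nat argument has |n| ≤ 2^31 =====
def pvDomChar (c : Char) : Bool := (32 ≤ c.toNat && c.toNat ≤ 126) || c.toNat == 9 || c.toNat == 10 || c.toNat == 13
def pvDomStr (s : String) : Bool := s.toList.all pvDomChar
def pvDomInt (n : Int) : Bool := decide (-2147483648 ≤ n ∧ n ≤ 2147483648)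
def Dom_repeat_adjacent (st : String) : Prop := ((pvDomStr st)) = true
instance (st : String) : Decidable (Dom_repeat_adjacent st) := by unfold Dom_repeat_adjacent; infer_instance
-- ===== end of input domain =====

-- B replaces A's interleaved scan (sentinel + accumulator list) by two plain passes:
-- run-length encoding, then a scan over run lengths with an integer block counter (objective: simpler).


-- ===== PORT A =====
-- loop body of A, over A's state (count, lst, el, count_el)
def aStep (s : Int × List Int × Option Char × Int) (i : Char) : Int × List Int × Option Char × Int :=
  match s with
  | (count, lst, el, count_el) =>
    match el with
    | none => (count, lst, some i, 1)
    | some e =>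
      if e == i then (count, lst, some e, count_el + 1)
      else if count_el == 1 then
        ((if lst.length > 1 then count + 1 else count), [], some i, 1)
      else (count, lst ++ [count_el], some i, 1)

def repeat_adjacent (st : String) : Int :=
  match st.toList.foldl aStep (0, [], none, 0) with
  | (count, lst, _, count_el) =>
    let lst' := if count_el > 1 then lst ++ [count_el] else lst
    if lst'.length > 1 then count + 1 else count

-- ===== PORT B =====
-- pass 1 of Source B: run-length encode (the inner `while j` loop = the matching prefix of the tail)
def runLengths : List Char → List Int
  | [] => []
  | c :: rest =>
    (((rest.takeWhile (· == c)).length : Int) + 1) ::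
      runLengths (rest.dropWhile (· == c))
termination_by l => l.length
decreasing_by
  simp only [List.length_cons]
  exact Nat.lt_succ_of_le (List.length_dropWhile_le _ _)

-- pass 2 of Source B: scan with (total, block)
def bStep (s : Int × Int) (L : Int) : Int × Int :=
  match s with
  | (total, block) =>
    if L ≥ 2 then (total, block + 1)
    else ((if block ≥ 2 then total + 1 else total), 0)

def repeat_adjacent_alt (st : String) : Int :=
  match (runLengths st.toList).foldl bStep (0, 0) with
  | (total, block) => if block ≥ 2 then total + 1 else total

-- ===== PRECONDITION & SPEC =====
def Spec_repeat_adjacent (st : String) (out : Int) : Prop := out = repeat_adjacent_alt st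
instance (st : String) (out : Int) : Decidable (Spec_repeat_adjacent st out) := by unfold Spec_repeat_adjacent; infer_instance

-- ===== CLAIM (what is proved, stated in full; the proofs are below) =====
def Claim_equal_repeat_adjacent : Prop := ∀ (st : String), Dom_repeat_adjacent st → Spec_repeat_adjacent st (repeat_adjacent st)

-- ===== LEMMAS AND PROOFS =====

theorem runLengths_nil : runLengths [] = [] := by simp [runLengths]

theorem runLengths_cons (c : Char) (rest : List Char) :
    runLengths (c :: rest)
      = (((rest.takeWhile (· == c)).length : Int) + 1) :: runLengths (rest.dropWhile (· == c)) := by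
  rw [runLengths]

-- A's whole computation after the fold, from an arbitrary mid-scan state
def goA (l : List Char) (s : Int × List Int × Option Char × Int) : Int :=
  match l.foldl aStep s with
  | (count, lst, _, count_el) =>
    let lst' := if count_el > 1 then lst ++ [count_el] else lst
    if lst'.length > 1 then count + 1 else count

-- B's whole computation after the fold, from an arbitrary mid-scan state
def goB (rs : List Int) (s : Int × Int) : Int :=
  match rs.foldl bStep s with
  | (total, block) => if block ≥ 2 then total + 1 else total

theorem goA_cons (i : Char) (rest : List Char) (s : Int × List Int × Option Char × Int) :
    goA (i :: rest) s = goA rest (aStep s i) := rfl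

theorem goB_cons (L : Int) (rs : List Int) (s : Int × Int) :
    goB (L :: rs) s = goB rs (bStep s L) := rfl

-- Main simulation: mid-run, A's state (t, lst, some c, m) corresponds to B seeing a first
-- run of length m plus the matching prefix of l, with block counter lst.length.
theorem goA_eq_goB (l : List Char) : ∀ (c : Char) (m t : Int) (lst : List Int), 1 ≤ m →
    goA l (t, lst, some c, m)
      = goB ((((l.takeWhile (· == c)).length : Int) + m) :: runLengths (l.dropWhile (· == c)))
            (t, (lst.length : Int)) := by
  induction l with
  | nil =>
    intro c m t lst hm
    simp only [goA, goB, List.takeWhile_nil, List.dropWhile_nil, runLengths_nil,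
      List.foldl_nil, List.foldl_cons, bStep, List.length_nil, Nat.cast_zero, zero_add]
    split_ifs <;> simp_all [List.length_append] <;> omega
  | cons i rest ih =>
    intro c m t lst hm
    by_cases h : i = c
    · subst h
      have hhead : (((i :: rest).takeWhile (· == i)).length : Int) + m
          = ((rest.takeWhile (· == i)).length : Int) + (m + 1) := by
        rw [List.takeWhile_cons_of_pos (by simp), List.length_cons]
        push_cast; ring
      rw [hhead, List.dropWhile_cons_of_pos (by simp), goA_cons]
      have hstep : aStep (t, lst, some i, m) i = (t, lst, some i, m + 1) := by
        simp [aStep]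
      rw [hstep]
      exact ih i (m + 1) t lst (by omega)
    · have hfc : (c == i) = false := by simp [Ne.symm h]
      rw [List.takeWhile_cons_of_neg (by simp [h]), List.dropWhile_cons_of_neg (by simp [h])]
      simp only [List.length_nil, Nat.cast_zero, zero_add]
      rw [goA_cons, goB_cons, runLengths_cons]
      by_cases hm1 : m = 1
      · subst hm1
        have hstepA : aStep (t, lst, some c, 1) i
            = ((if lst.length > 1 then t + 1 else t), [], some i, 1) := by
          simp [aStep, hfc]
        have hstepB : bStep (t, (lst.length : Int)) 1
            = ((if lst.length > 1 then t + 1 else t), 0) := by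
          simp only [bStep]
          rw [if_neg (by omega)]
          congr 1
          by_cases hb : lst.length > 1
          · rw [if_pos hb, if_pos (by omega)]
          · rw [if_neg hb, if_neg (by omega)]
        rw [hstepA, hstepB]
        have := ih i 1 (if lst.length > 1 then t + 1 else t) [] le_rfl
        simpa using this
      · have hstepA : aStep (t, lst, some c, m) i = (t, lst ++ [m], some i, 1) := by
          simp [aStep, hfc, hm1]
        have hstepB : bStep (t, (lst.length : Int)) m = (t, (lst.length : Int) + 1) := by
          simp only [bStep]
          rw [if_pos (by omega)]
        rw [hstepA, hstepB]
        have := ih i 1 t (lst ++ [m]) le_rfl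
        simpa [push_cast] using this

-- ===== VERDICT (by name: the statement is the Claim_ definition above) =====
theorem repeat_adjacent_spec : Claim_equal_repeat_adjacent := by
  intro st _
  unfold Spec_repeat_adjacent
  show goA st.toList (0, [], none, 0) = goB (runLengths st.toList) (0, 0)
  cases st.toList with
  | nil => simp [goA, goB, runLengths_nil]
  | cons c rest =>
    rw [goA_cons]
    have hstep : aStep (0, [], none, 0) c = (0, [], some c, 1) := rfl
    rw [hstep, runLengths_cons]
    have := goA_eq_goB rest c 1 0 [] le_rfl
    simpa using this
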